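-- pv_equiv track=rewrite | github.com/castillo-ac/Da | query_converter/query_converter/functions/data_profiling.py | _invert_to_base_list
-- ===== SOURCE A (Python) =====
-- def _resolve_chain(ref, fwd):
--     """Alias/cte column name with the base name (without alias)."""
--     seen = set()
--     cur = ref
--     while isinstance(cur, str) and cur in fwd and cur not in seen:
--         seen.add(cur)
--         cur = fwd[cur]
--     return cur
--
-- def _invert_to_base_list(fwd):
--     """Build base -> [aliases] map"""
--     collapsed = {k: _resolve_chain(v, fwd) for k, v in fwd.items()}
--     rev = {}
--     for alias, base in collapsed.items():
--         if not isinstance(base, str):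
--             continue
--         rev.setdefault(base, [])
--         if alias not in rev[base]:
--             rev[base].append(alias)
--     return rev
-- ===== SOURCE B (Python) =====
-- def _invert_to_base_list(fwd):
--     """Build base -> [aliases] map (memoized chain resolution with path compression)."""
--     cache = {}  # x -> result of following the alias chain starting at x
--     for start in fwd:
--         if start in cache:
--             continue
--         path = []
--         pos = {}
--         cur = start
--         while cur in fwd and cur not in cache and cur not in pos:
--             pos[cur] = len(path)
--             path.append(cur)
--             cur = fwd[cur]
--         if cur in pos:
--             i = pos[cur]
--             for node in path[:i]:
--                 cache[node] = cur
--             for node in path[i:]: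
--                 cache[node] = node
--         else:
--             base = cache.get(cur, cur)
--             for node in path:
--                 cache[node] = base
--     rev = {}
--     for alias, val in fwd.items():
--         base = cache.get(val, val)
--         rev.setdefault(base, [])
--         if alias not in rev[base]:
--             rev[base].append(alias)
--     return rev
-- ===== Notes on version B (the rewrite author's own statement) =====
-- stated objective: alternative
-- what changed: Replaces A's independent per-key chain walk with a single memoized pass that path-compresses each discovered chain (caching every visited node's final base, with cycle nodes cached to themselves and tail nodes to the cycle entry), so no node's chain is ever re-walked; on the generated short-chain inputs this measured at the same cost as A.
import Mathlib
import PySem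

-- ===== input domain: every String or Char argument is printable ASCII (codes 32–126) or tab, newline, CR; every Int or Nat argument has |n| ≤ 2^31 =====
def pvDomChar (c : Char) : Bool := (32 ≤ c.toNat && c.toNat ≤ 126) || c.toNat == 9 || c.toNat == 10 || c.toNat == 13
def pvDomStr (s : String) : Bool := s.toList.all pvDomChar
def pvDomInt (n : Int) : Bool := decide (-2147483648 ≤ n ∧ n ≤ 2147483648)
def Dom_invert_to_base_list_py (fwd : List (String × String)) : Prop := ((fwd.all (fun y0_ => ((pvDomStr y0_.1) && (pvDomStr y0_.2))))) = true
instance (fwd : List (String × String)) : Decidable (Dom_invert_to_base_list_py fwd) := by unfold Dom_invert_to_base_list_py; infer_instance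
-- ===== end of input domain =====

-- B replaces A's independent chain walk per key by one memoized, path-compressing pass
-- (each node's base is cached the first time its chain is walked, so no chain is re-walked).

-- termination helper (cited by the ports' decreasing_by): filtering by a strictly stronger
-- predicate that loses a present witness gives a strictly shorter list
theorem pvFilterLe {α : Type} {p q : α → Bool} (l : List α)
    (himp : ∀ k, q k = true → p k = true) :
    (l.filter q).length ≤ (l.filter p).length := by
  induction l with
  | nil => simp
  | cons a t ih =>
    by_cases hq : q a = true
    · simp [List.filter_cons, hq, himp a hq]; omega
    · simp only [List.filter_cons, Bool.not_eq_true] at *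
      by_cases hp : p a = true <;> simp [hq, hp] <;> omega

theorem pvFilterLt {α : Type} {p q : α → Bool} {l : List α} {x : α}
    (himp : ∀ k, q k = true → p k = true)
    (hx : x ∈ l) (hpx : p x = true) (hqx : q x = false) :
    (l.filter q).length < (l.filter p).length := by
  induction l with
  | nil => cases hx
  | cons a t ih =>
    rcases List.mem_cons.1 hx with rfl | hxt
    · have h1 : (t.filter q).length ≤ (t.filter p).length := pvFilterLe t himp
      simp [List.filter_cons, hpx, hqx]; omega
    · have h1 := ih hxt
      by_cases hq : q a = true
      · simp [List.filter_cons, hq, himp a hq]; omega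
      · simp only [Bool.not_eq_true] at hq
        by_cases hp : p a = true <;> simp [List.filter_cons, hq, hp] <;> omega

-- ===== PORT A =====
-- _resolve_chain(ref, fwd): `while cur in fwd and cur not in seen: seen.add(cur); cur = fwd[cur]`
-- (the `isinstance(cur, str)` guard is always true here: fwd is dict[str,str]).
-- `fwd[cur]` is total under the `cur in fwd` guard; ported as getD with an unused default.
def pyResolveChain (d : PySem.Dict String String) (seen : List String) (cur : String) : String :=
  if h : d.contains cur = true ∧ cur ∉ seen then
    pyResolveChain d (PySem.Set.add seen cur) (d.getD cur "")
  else cur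
termination_by (d.keys.filter (fun k => decide (k ∉ seen))).length
decreasing_by
  rw [PySem.Set.add_of_not_mem h.2]
  exact pvFilterLt (p := fun k => decide (k ∉ seen)) (q := fun k => decide (k ∉ seen ++ [cur]))
    (by intro k hk; simp at hk ⊢; exact hk.1)
    ((PySem.Dict.contains_iff_mem_keys _ _).1 h.1) (by simp [h.2]) (by simp)

-- the dict `fwd` of the Python is the dict built from the association list (last value wins,
-- first position kept), i.e. PySem.Dict.ofList fwd; both ports start from it identically.
def invert_to_base_list_py (fwd : List (String × String)) : List (String × List String) :=
  let d := PySem.Dict.ofList fwd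
  -- collapsed = {k: _resolve_chain(v, fwd) for k, v in fwd.items()}
  let collapsed : PySem.Dict String String :=
    d.items.foldl (fun c kv => c.insert kv.1 (pyResolveChain d [] kv.2)) PySem.Dict.empty
  -- rev loop: setdefault, membership test, append
  let rev : PySem.Dict String (List String) :=
    collapsed.items.foldl (fun r kv =>
      let r := r.setdefault kv.2 []
      if kv.1 ∈ r.getD kv.2 [] then r else r.modify kv.2 [] (fun l => l ++ [kv.1])) PySem.Dict.empty
  rev.items

-- ===== PORT B =====
-- Source B inner while loop: walks the chain collecting `path` (Source B also keeps `pos`, the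
-- index of each path element; since `path` is duplicate-free this is `path.idxOf`, used below).
def pyFindPath (d : PySem.Dict String String) (cache : PySem.Dict String String)
    (path : List String) (cur : String) : List String × String :=
  if h : d.contains cur = true ∧ cache.contains cur = false ∧ cur ∉ path then
    pyFindPath d cache (path ++ [cur]) (d.getD cur "")
  else (path, cur)
termination_by (d.keys.filter (fun k => decide (cache.contains k = false ∧ k ∉ path))).length
decreasing_by
  exact pvFilterLt (p := fun k => decide (cache.contains k = false ∧ k ∉ path))
    (q := fun k => decide (cache.contains k = false ∧ k ∉ path ++ [cur]))
    (by intro k hk; simp at hk ⊢; exact ⟨hk.1, hk.2.1⟩)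
    ((PySem.Dict.contains_iff_mem_keys _ _).1 h.1) (by simp [h.2.1, h.2.2]) (by simp)

-- one iteration of Source B's outer `for start in fwd:` loop
def pyCacheStep (d : PySem.Dict String String) (cache : PySem.Dict String String)
    (start : String) : PySem.Dict String String :=
  if cache.contains start then cache
  else
    let pr := pyFindPath d cache [] start
    let path := pr.1
    let cur := pr.2
    if cur ∈ path then
      -- cycle: nodes before the entry point map to it, cycle nodes map to themselves
      let i := path.idxOf cur
      let c1 := (path.take i).foldl (fun c x => c.insert x cur) cache
      (path.drop i).foldl (fun c x => c.insert x x) c1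
    else
      let base := cache.getD cur cur
      path.foldl (fun c x => c.insert x base) cache

def invert_to_base_list_py_alt (fwd : List (String × String)) : List (String × List String) :=
  let d := PySem.Dict.ofList fwd
  let cache := d.keys.foldl (pyCacheStep d) PySem.Dict.empty
  let rev : PySem.Dict String (List String) :=
    d.items.foldl (fun r kv =>
      let base := cache.getD kv.2 kv.2
      let r := r.setdefault base []
      if kv.1 ∈ r.getD base [] then r else r.modify base [] (fun l => l ++ [kv.1])) PySem.Dict.empty
  rev.items

-- ===== PRECONDITION & SPEC =====
def Spec_invert_to_base_list_py (fwd : List (String × String)) (out : List (String × List String)) : Prop := out = invert_to_base_list_py_alt fwd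
instance (fwd : List (String × String)) (out : List (String × List String)) : Decidable (Spec_invert_to_base_list_py fwd out) := by unfold Spec_invert_to_base_list_py; infer_instance

-- ===== CLAIM (what is proved, stated in full; the proofs are below) =====
def Claim_equal_invert_to_base_list_py : Prop := ∀ (fwd : List (String × String)), Dom_invert_to_base_list_py fwd → Spec_invert_to_base_list_py fwd (invert_to_base_list_py fwd)

-- ===== LEMMAS AND PROOFS =====

-- the link relation of the chain: pvLink d a b ↔ fwd[a] = b
def pvLink (d : PySem.Dict String String) (a b : String) : Prop := d.getD a "" = b

-- pvSteps d seen x q z: starting at x with visited set `seen`, A's while loop consumes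
-- exactly the nodes of q (in order) and is then standing at z with visited set seen ++ q.
def pvSteps (d : PySem.Dict String String) : List String → String → List String → String → Prop
  | _, x, [], z => z = x
  | seen, x, y :: q, z =>
      y = x ∧ d.contains x = true ∧ x ∉ seen ∧ pvSteps d (seen ++ [x]) (d.getD x "") q z

theorem pvResolve_stop (d : PySem.Dict String String) {seen : List String} {z : String}
    (h : ¬(d.contains z = true ∧ z ∉ seen)) : pyResolveChain d seen z = z := by
  rw [pyResolveChain]; exact dif_neg h

theorem pvSteps_resolve (d : PySem.Dict String String) :
    ∀ (q seen : List String) (x z : String), pvSteps d seen x q z →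
    pyResolveChain d seen x = pyResolveChain d (seen ++ q) z := by
  intro q
  induction q with
  | nil => intro seen x z h; cases h; simp
  | cons y q ih =>
    intro seen x z h
    obtain ⟨rfl, hc, hns, hs⟩ := h
    rw [pyResolveChain, dif_pos ⟨hc, hns⟩, PySem.Set.add_of_not_mem hns]
    rw [ih _ _ _ hs]; simp

theorem pvSteps_append (d : PySem.Dict String String) :
    ∀ (q q' seen : List String) (x z w : String),
    pvSteps d seen x q z → pvSteps d (seen ++ q) z q' w → pvSteps d seen x (q ++ q') w := by
  intro q
  induction q with
  | nil => intro q' seen x z w h1 h2; cases h1; simpa using h2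
  | cons y q ih =>
    intro q' seen x z w h1 h2
    obtain ⟨rfl, hc, hns, hs⟩ := h1
    exact ⟨rfl, hc, hns, ih _ _ _ _ _ hs (by simpa using h2)⟩

theorem pvSteps_build (d : PySem.Dict String String) :
    ∀ (q : List String) (x z : String) (seen : List String),
    List.IsChain (pvLink d) (x :: q ++ [z]) → (x :: q).Nodup →
    (∀ y ∈ x :: q, d.contains y = true ∧ y ∉ seen) →
    pvSteps d seen x (x :: q) z := by
  intro q
  induction q with
  | nil =>
    intro x z seen hch hnd hmem
    have hx := hmem x (by simp)
    have hlink : pvLink d x z :=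
      (List.isChain_cons_cons.1 (by simpa using hch : List.IsChain (pvLink d) (x :: [z]))).1
    exact ⟨rfl, hx.1, hx.2, hlink.symm⟩
  | cons y q ih =>
    intro x z seen hch hnd hmem
    have hx := hmem x (by simp)
    have hch' : List.IsChain (pvLink d) (x :: y :: q ++ [z]) := by simpa using hch
    have hlink : pvLink d x y := (List.isChain_cons_cons.1 hch').1
    refine ⟨rfl, hx.1, hx.2, ?_⟩
    rw [show d.getD x "" = y from hlink]
    apply ih
    · exact (List.isChain_cons_cons.1 hch').2
    · exact hnd.of_cons
    · intro y' hy'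
      have h1 := hmem y' (List.mem_cons_of_mem _ hy')
      refine ⟨h1.1, ?_⟩
      simp only [List.mem_append, List.mem_singleton]
      rintro (hs | rfl)
      · exact h1.2 hs
      · exact (List.nodup_cons.1 hnd).1 hy'


-- resolving from inside the cached, chain-closed region does not depend on which
-- non-cached nodes are already in `seen`
theorem pvResolve_agree (d cache : PySem.Dict String String)
    (hcl : ∀ y, cache.contains y = true →
      d.contains y = true ∧ (d.contains (d.getD y "") = true → cache.contains (d.getD y "") = true)) :
    ∀ (seen1 seen2 : List String) (r : String), cache.contains r = true →
    (∀ y, cache.contains y = true → (y ∈ seen1 ↔ y ∈ seen2)) →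
    pyResolveChain d seen1 r = pyResolveChain d seen2 r := by
  have main : ∀ (n : Nat) (seen1 seen2 : List String) (r : String),
      (d.keys.filter (fun k => decide (k ∉ seen1))).length ≤ n →
      cache.contains r = true →
      (∀ y, cache.contains y = true → (y ∈ seen1 ↔ y ∈ seen2)) →
      pyResolveChain d seen1 r = pyResolveChain d seen2 r := by
    intro n
    induction n with
    | zero =>
      intro seen1 seen2 r hm hr hiff
      by_cases hr1 : r ∈ seen1
      · rw [pvResolve_stop d (by simp [hr1]), pvResolve_stop d (by simp [(hiff r hr).1 hr1])]
      · exfalso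
        have hmem : r ∈ d.keys.filter (fun k => decide (k ∉ seen1)) :=
          List.mem_filter.2 ⟨(PySem.Dict.contains_iff_mem_keys _ _).1 (hcl r hr).1, by simp [hr1]⟩
        have := List.length_pos_of_mem hmem
        omega
    | succ n ih =>
      intro seen1 seen2 r hm hr hiff
      by_cases hr1 : r ∈ seen1
      · rw [pvResolve_stop d (by simp [hr1]), pvResolve_stop d (by simp [(hiff r hr).1 hr1])]
      · have hr2 : r ∉ seen2 := fun h => hr1 ((hiff r hr).2 h)
        have hcr : d.contains r = true := (hcl r hr).1
        rw [pyResolveChain, dif_pos ⟨hcr, hr1⟩, PySem.Set.add_of_not_mem hr1]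
        conv_rhs => rw [pyResolveChain]
        rw [dif_pos ⟨hcr, hr2⟩, PySem.Set.add_of_not_mem hr2]
        by_cases hc' : d.contains (d.getD r "") = true
        · have hcach' : cache.contains (d.getD r "") = true := (hcl r hr).2 hc'
          apply ih
          · have hlt : (d.keys.filter (fun k => decide (k ∉ seen1 ++ [r]))).length <
                (d.keys.filter (fun k => decide (k ∉ seen1))).length :=
              pvFilterLt (by intro k hk; simp at hk ⊢; exact hk.1)
                ((PySem.Dict.contains_iff_mem_keys _ _).1 hcr) (by simp [hr1]) (by simp)
            omega
          · exact hcach'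
          · intro y hy
            simp only [List.mem_append, List.mem_singleton]
            rw [hiff y hy]
        · rw [pvResolve_stop d (by simp [hc']), pvResolve_stop d (by simp [hc'])]
  exact fun seen1 seen2 r hr hiff => main _ seen1 seen2 r (le_refl _) hr hiff

theorem pvGet?_foldl_insert_fun (g : String → String) :
    ∀ (l : List String) (c : PySem.Dict String String) (k : String),
    (l.foldl (fun c x => c.insert x (g x)) c).get? k = if k ∈ l then some (g k) else c.get? k := by
  intro l
  induction l with
  | nil => simp
  | cons a t ih =>
    intro c k
    rw [List.foldl_cons, ih]
    by_cases hkt : k ∈ t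
    · simp [hkt]
    · rw [PySem.Dict.get?_insert]
      by_cases hka : k = a <;> simp [hkt, hka]

-- findPath produces a duplicate-free uncached chain and a stopping point
theorem pvFindPath_spec (d cache : PySem.Dict String String) :
    ∀ (path : List String) (cur : String),
    path.Nodup → (∀ y ∈ path, d.contains y = true ∧ cache.contains y = false) →
    List.IsChain (pvLink d) (path ++ [cur]) →
    (pyFindPath d cache path cur).1.Nodup ∧
    (∀ y ∈ (pyFindPath d cache path cur).1, d.contains y = true ∧ cache.contains y = false) ∧
    List.IsChain (pvLink d) ((pyFindPath d cache path cur).1 ++ [(pyFindPath d cache path cur).2]) ∧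
    ¬(d.contains (pyFindPath d cache path cur).2 = true ∧
      cache.contains (pyFindPath d cache path cur).2 = false ∧
      (pyFindPath d cache path cur).2 ∉ (pyFindPath d cache path cur).1) ∧
    (∀ y ∈ path, y ∈ (pyFindPath d cache path cur).1) ∧
    (d.contains cur = true → cache.contains cur = false → cur ∉ path →
      cur ∈ (pyFindPath d cache path cur).1) := by
  intro path cur
  induction path, cur using pyFindPath.induct d cache with
  | case1 path cur h ih =>
    intro hnd hmem hch
    rw [pyFindPath, dif_pos h]
    obtain ⟨hc, hnc, hnp⟩ := h
    have hnd' : (path ++ [cur]).Nodup := by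
      rw [List.nodup_append]
      refine ⟨hnd, List.nodup_singleton _, ?_⟩
      intro a ha b hb heq
      exact hnp ((List.eq_of_mem_singleton hb) ▸ heq ▸ ha)
    have hmem' : ∀ y ∈ path ++ [cur], d.contains y = true ∧ cache.contains y = false := by
      intro y hy
      rcases List.mem_append.1 hy with hy | hy
      · exact hmem y hy
      · simp only [List.mem_singleton] at hy; subst hy; exact ⟨hc, hnc⟩
    have hch' : List.IsChain (pvLink d) ((path ++ [cur]) ++ [d.getD cur ""]) := by
      rw [List.isChain_append]
      refine ⟨hch, List.isChain_singleton _, ?_⟩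
      intro a ha b hb
      simp only [List.getLast?_append, List.getLast?_singleton] at ha
      simp only [List.head?_cons] at hb
      cases ha; cases hb; rfl
    obtain ⟨h1, h2, h3, h4, h5, h6⟩ := ih hnd' hmem' hch'
    refine ⟨h1, h2, h3, h4, ?_, ?_⟩
    · intro y hy; exact h5 y (List.mem_append_left _ hy)
    · intro _ _ _; exact h5 cur (by simp)
  | case2 path cur h =>
    intro hnd hmem hch
    rw [pyFindPath, dif_neg h]
    exact ⟨hnd, hmem, hch, h, fun y hy => hy,
      fun h1 h2 h3 => absurd ⟨h1, h2, h3⟩ h⟩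


theorem pvChainSeg {R : String → String → Prop} {l₁ l : List String}
    (h : List.IsChain R l) (s t : List String) (heq : s ++ l₁ ++ t = l) : List.IsChain R l₁ := by
  have h1 : List.IsChain R (l₁ ++ t) := h.suffix ⟨s, by rw [← heq, List.append_assoc]⟩
  exact h1.prefix ⟨t, rfl⟩

theorem pvSteps_resolve_end (d : PySem.Dict String String) {x z : String} {q : List String}
    (hs : pvSteps d [] x q z) (hstop : ¬(d.contains z = true ∧ z ∉ q)) :
    pyResolveChain d [] x = z := by
  have h1 := pvSteps_resolve d q [] x z hs
  rw [h1, List.nil_append]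
  exact pvResolve_stop d hstop

theorem pvSteps_of_suffix (d : PySem.Dict String String) {p : List String} {r : String}
    (c e : List String) (x : String) (hp : p = c ++ x :: e) (hnd : p.Nodup)
    (hmem : ∀ y ∈ p, d.contains y = true)
    (hch : List.IsChain (pvLink d) (p ++ [r])) :
    pvSteps d [] x (x :: e) r := by
  apply pvSteps_build
  · exact hch.suffix ⟨c, by simp [hp]⟩
  · have : (c ++ x :: e).Nodup := hp ▸ hnd
    exact (List.nodup_append.1 this).2.1
  · intro y hy
    exact ⟨hmem y (hp ▸ List.mem_append_right c hy), by simp⟩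

-- Case: the chain walked off the keys — every path node resolves to the terminal r
theorem pvCase_noterm (d : PySem.Dict String String) {p : List String} {r : String}
    (hnd : p.Nodup) (hmem : ∀ y ∈ p, d.contains y = true)
    (hch : List.IsChain (pvLink d) (p ++ [r])) (hr : d.contains r = false) :
    ∀ x ∈ p, pyResolveChain d [] x = r := by
  intro x hx
  obtain ⟨c, e, rfl⟩ := List.append_of_mem hx
  exact pvSteps_resolve_end d (pvSteps_of_suffix d c e x rfl hnd hmem hch) (by simp [hr])

-- Case: the chain hit a node r already in the cached, chain-closed region
theorem pvCase_cached (d cache : PySem.Dict String String)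
    (hcl : ∀ y, cache.contains y = true →
      d.contains y = true ∧ (d.contains (d.getD y "") = true → cache.contains (d.getD y "") = true))
    {p : List String} {r : String}
    (hnd : p.Nodup) (hmem : ∀ y ∈ p, d.contains y = true ∧ cache.contains y = false)
    (hch : List.IsChain (pvLink d) (p ++ [r])) (hr : cache.contains r = true) :
    ∀ x ∈ p, pyResolveChain d [] x = pyResolveChain d [] r := by
  intro x hx
  obtain ⟨c, e, rfl⟩ := List.append_of_mem hx
  have hs := pvSteps_of_suffix d c e x rfl hnd (fun y hy => (hmem y hy).1) hch
  have h1 := pvSteps_resolve d (x :: e) [] x r hs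
  rw [List.nil_append] at h1
  rw [h1]
  apply pvResolve_agree d cache hcl (x :: e) [] r hr
  intro y hy
  constructor
  · intro hymem
    have hyp : y ∈ c ++ x :: e := List.mem_append_right c hymem
    exact absurd hy (by simp [(hmem y hyp).2])
  · intro h; cases h

-- Cycle case: a node of the cycle resolves to itself
theorem pvCase_cycle_self (d : PySem.Dict String String) {p : List String} {r : String}
    (hnd : p.Nodup) (hmem : ∀ y ∈ p, d.contains y = true)
    (hch : List.IsChain (pvLink d) (p ++ [r])) {u v' : List String} (hp : p = u ++ r :: v') :
    ∀ x ∈ r :: v', pyResolveChain d [] x = x := by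
  intro x hx
  obtain ⟨a, b, hab⟩ := List.append_of_mem hx
  have hpx : p = (u ++ a) ++ x :: b := by rw [hp, hab]; simp
  have hs1 := pvSteps_of_suffix d (u ++ a) b x hpx hnd hmem hch
  cases a with
  | nil =>
    simp only [List.nil_append] at hab
    have hrx : r = x := by injection hab
    subst hrx
    exact pvSteps_resolve_end d hs1 (by simp)
  | cons a0 a' =>
    injection hab with h1 h2
    subst h1
    have hv' : v' = a' ++ x :: b := h2
    -- the wrap-around segment: from r back to x
    have hndrv : (r :: v').Nodup := by
      have : (u ++ r :: v').Nodup := hp ▸ hnd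
      exact (List.nodup_append.1 this).2.1
    have hs2 : pvSteps d (x :: b) r (r :: a') x := by
      apply pvSteps_build
      · -- (r :: a') ++ [x] is an infix of p ++ [r]
        exact pvChainSeg hch u (b ++ [r]) (by rw [hp, hv']; simp)
      · have : ((r :: a') ++ (x :: b)).Nodup := by rw [List.cons_append, ← hv']; exact hndrv
        exact (List.nodup_append.1 this).1
      · intro y hy
        have hyp : y ∈ p := by
          rw [hp, hv']
          exact List.mem_append_right u (by
            rcases List.mem_cons.1 hy with rfl | hy'
            · exact List.mem_cons_self
            · exact List.mem_cons_of_mem _ (List.mem_append_left _ hy'))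
        refine ⟨hmem y hyp, ?_⟩
        have : ((r :: a') ++ (x :: b)).Nodup := by rw [List.cons_append, ← hv']; exact hndrv
        have hdis := List.nodup_append.1 this
        intro hmemxb
        exact hdis.2.2 y hy y hmemxb rfl
    have hs3 : pvSteps d [] x ((x :: b) ++ (r :: a')) x := by
      apply pvSteps_append d (x :: b) (r :: a') [] x r x hs1
      simpa using hs2
    exact pvSteps_resolve_end d hs3 (by simp)

-- Cycle case: a node strictly before the cycle entry resolves to the entry r
theorem pvCase_cycle_pre (d : PySem.Dict String String) {p : List String} {r : String}
    (hnd : p.Nodup) (hmem : ∀ y ∈ p, d.contains y = true)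
    (hch : List.IsChain (pvLink d) (p ++ [r])) {u v' : List String} (hp : p = u ++ r :: v') :
    ∀ x ∈ u, pyResolveChain d [] x = r := by
  intro x hx
  obtain ⟨c, e, hce⟩ := List.append_of_mem hx
  have hpx : p = c ++ x :: (e ++ r :: v') := by rw [hp, hce]; simp
  have hs1 := pvSteps_of_suffix d c (e ++ r :: v') x hpx hnd hmem hch
  exact pvSteps_resolve_end d hs1 (by simp)


-- the invariant of Source B's cache: every entry is A's resolved base, and the cached region
-- is closed under one chain step
def pvInv (d cache : PySem.Dict String String) : Prop :=
  (∀ x b, cache.get? x = some b → pyResolveChain d [] x = b) ∧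
  (∀ y, cache.contains y = true →
    d.contains y = true ∧ (d.contains (d.getD y "") = true → cache.contains (d.getD y "") = true))

theorem pvChain_succ (d : PySem.Dict String String) {p : List String} {r : String}
    (hch : List.IsChain (pvLink d) (p ++ [r])) :
    ∀ x ∈ p, d.getD x "" ∈ p ∨ d.getD x "" = r := by
  intro x hx
  obtain ⟨c, e, rfl⟩ := List.append_of_mem hx
  cases e with
  | nil =>
    right
    have : List.IsChain (pvLink d) [x, r] := pvChainSeg hch c [] (by simp)
    exact (List.isChain_cons_cons.1 this).1
  | cons y e' =>
    left
    have : List.IsChain (pvLink d) [x, y] := pvChainSeg hch c (e' ++ [r]) (by simp)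
    rw [(List.isChain_cons_cons.1 this).1]
    exact List.mem_append_right c (List.mem_cons_of_mem _ List.mem_cons_self)

-- one cache update of Source B preserves the invariant and caches every path node
theorem pvCacheUpdate_inv (d cache : PySem.Dict String String) (hinv : pvInv d cache)
    (p : List String) (r : String)
    (hnd : p.Nodup) (hmem : ∀ y ∈ p, d.contains y = true ∧ cache.contains y = false)
    (hch : List.IsChain (pvLink d) (p ++ [r]))
    (hstop : ¬(d.contains r = true ∧ cache.contains r = false ∧ r ∉ p)) :
    pvInv d (if r ∈ p then
        (p.drop (p.idxOf r)).foldl (fun c x => c.insert x x)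
          ((p.take (p.idxOf r)).foldl (fun c x => c.insert x r) cache)
      else p.foldl (fun c x => c.insert x (cache.getD r r)) cache) ∧
    (∀ k, cache.contains k = true → (if r ∈ p then
        (p.drop (p.idxOf r)).foldl (fun c x => c.insert x x)
          ((p.take (p.idxOf r)).foldl (fun c x => c.insert x r) cache)
      else p.foldl (fun c x => c.insert x (cache.getD r r)) cache).contains k = true) ∧
    (∀ z ∈ p, (if r ∈ p then
        (p.drop (p.idxOf r)).foldl (fun c x => c.insert x x)
          ((p.take (p.idxOf r)).foldl (fun c x => c.insert x r) cache)
      else p.foldl (fun c x => c.insert x (cache.getD r r)) cache).contains z = true) := by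
  by_cases hcyc : r ∈ p
  · simp only [hcyc, if_true]
    have hi : p.idxOf r < p.length := List.idxOf_lt_length_of_mem hcyc
    have hdrop : p.drop (p.idxOf r) = r :: p.drop (p.idxOf r + 1) := by
      rw [List.drop_eq_getElem_cons hi, List.getElem_idxOf]
    have hp : p = p.take (p.idxOf r) ++ r :: p.drop (p.idxOf r + 1) := by
      conv_lhs => rw [← List.take_append_drop (p.idxOf r) p]
      rw [hdrop]
    have hget : ∀ k, ((p.drop (p.idxOf r)).foldl (fun c x => c.insert x x)
        ((p.take (p.idxOf r)).foldl (fun c x => c.insert x r) cache)).get? k =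
        if k ∈ p.drop (p.idxOf r) then some k
        else if k ∈ p.take (p.idxOf r) then some r else cache.get? k := by
      intro k
      rw [pvGet?_foldl_insert_fun (fun x => x), pvGet?_foldl_insert_fun (fun _ => r)]
    have hcont : ∀ k, ((p.drop (p.idxOf r)).foldl (fun c x => c.insert x x)
        ((p.take (p.idxOf r)).foldl (fun c x => c.insert x r) cache)).contains k =
        (decide (k ∈ p.drop (p.idxOf r)) || decide (k ∈ p.take (p.idxOf r)) || cache.contains k) := by
      intro k
      rw [PySem.Dict.contains_eq_isSome_get?, hget]
      by_cases h1 : k ∈ p.drop (p.idxOf r) <;> by_cases h2 : k ∈ p.take (p.idxOf r) <;>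
        simp [h1, h2, PySem.Dict.contains_eq_isSome_get?]
    have hcontp : ∀ z ∈ p, ((p.drop (p.idxOf r)).foldl (fun c x => c.insert x x)
        ((p.take (p.idxOf r)).foldl (fun c x => c.insert x r) cache)).contains z = true := by
      intro z hz
      rw [hcont]
      rcases List.mem_append.1 (by rw [List.take_append_drop]; exact hz :
        z ∈ p.take (p.idxOf r) ++ p.drop (p.idxOf r)) with h | h <;> simp [h]
    refine ⟨⟨?_, ?_⟩, ?_, hcontp⟩
    · intro x b hb
      rw [hget] at hb
      split_ifs at hb with h1 h2
      · cases hb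
        exact pvCase_cycle_self d hnd (fun y hy => (hmem y hy).1) hch hp x (hdrop ▸ h1)
      · cases hb
        exact pvCase_cycle_pre d hnd (fun y hy => (hmem y hy).1) hch hp x h2
      · exact hinv.1 x b hb
    · intro y hy
      rw [hcont] at hy
      simp only [Bool.or_eq_true, decide_eq_true_eq] at hy
      rcases hy with (h1 | h2) | h3
      · have hyp : y ∈ p := List.mem_of_mem_drop h1
        refine ⟨(hmem y hyp).1, fun _ => ?_⟩
        rcases pvChain_succ d hch y hyp with hin | heq
        · exact hcontp _ hin
        · rw [heq]; exact hcontp _ hcyc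
      · have hyp : y ∈ p := List.mem_of_mem_take h2
        refine ⟨(hmem y hyp).1, fun _ => ?_⟩
        rcases pvChain_succ d hch y hyp with hin | heq
        · exact hcontp _ hin
        · rw [heq]; exact hcontp _ hcyc
      · obtain ⟨hd1, hd2⟩ := hinv.2 y h3
        refine ⟨hd1, fun hf => ?_⟩
        rw [hcont]; simp [hd2 hf]
    · intro k hk
      rw [hcont]; simp [hk]
  · simp only [hcyc, if_false]
    have hget : ∀ k, (p.foldl (fun c x => c.insert x (cache.getD r r)) cache).get? k =
        if k ∈ p then some (cache.getD r r) else cache.get? k := by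
      intro k
      rw [pvGet?_foldl_insert_fun (fun _ => cache.getD r r)]
    have hcont : ∀ k, (p.foldl (fun c x => c.insert x (cache.getD r r)) cache).contains k =
        (decide (k ∈ p) || cache.contains k) := by
      intro k
      rw [PySem.Dict.contains_eq_isSome_get?, hget]
      by_cases h1 : k ∈ p <;> simp [h1, PySem.Dict.contains_eq_isSome_get?]
    have hres : ∀ x ∈ p, pyResolveChain d [] x = cache.getD r r := by
      by_cases hrc : cache.contains r = true
      · intro x hx
        have hsome : ∃ b, cache.get? r = some b := by
          have := PySem.Dict.contains_eq_isSome_get? cache r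
          rw [hrc] at this
          exact Option.isSome_iff_exists.1 this.symm
        obtain ⟨b, hb⟩ := hsome
        rw [PySem.Dict.getD_of_get?_eq_some _ _ hb]
        rw [pvCase_cached d cache hinv.2 hnd hmem hch hrc x hx]
        exact hinv.1 r b hb
      · have hrc' : cache.contains r = false := by simpa using hrc
        have hdr : d.contains r = false := by
          by_contra hdr'
          exact hstop ⟨by simpa using hdr', hrc', hcyc⟩
        intro x hx
        rw [PySem.Dict.getD_of_not_contains _ _ hrc']
        exact pvCase_noterm d hnd (fun y hy => (hmem y hy).1) hch hdr x hx
    refine ⟨⟨?_, ?_⟩, ?_, ?_⟩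
    · intro x b hb
      rw [hget] at hb
      split_ifs at hb with h1
      · cases hb; exact hres x h1
      · exact hinv.1 x b hb
    · intro y hy
      rw [hcont] at hy
      simp only [Bool.or_eq_true, decide_eq_true_eq] at hy
      rcases hy with h1 | h2
      · refine ⟨(hmem y h1).1, fun hf => ?_⟩
        rcases pvChain_succ d hch y h1 with hin | heq
        · rw [hcont]; simp [hin]
        · rw [heq] at hf ⊢
          have hrc : cache.contains r = true := by
            by_contra hrc'
            exact hstop ⟨hf, by simpa using hrc', hcyc⟩
          rw [hcont]; simp [hrc]
      · obtain ⟨hd1, hd2⟩ := hinv.2 y h2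
        refine ⟨hd1, fun hf => ?_⟩
        rw [hcont]; simp [hd2 hf]
    · intro k hk
      rw [hcont]; simp [hk]
    · intro z hz
      rw [hcont]; simp [hz]


theorem pvCacheStep_inv (d cache : PySem.Dict String String) (start : String)
    (hinv : pvInv d cache) :
    pvInv d (pyCacheStep d cache start) ∧
    (∀ k, cache.contains k = true → (pyCacheStep d cache start).contains k = true) ∧
    (d.contains start = true → (pyCacheStep d cache start).contains start = true) := by
  by_cases hs : cache.contains start = true
  · have hred0 : pyCacheStep d cache start = cache := by simp [pyCacheStep, hs]
    rw [hred0]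
    exact ⟨hinv, fun k h => h, fun _ => hs⟩
  · have hs' : cache.contains start = false := by simpa using hs
    obtain ⟨hnd, hmem, hch, hstop, _, hstartin⟩ :=
      pvFindPath_spec d cache [] start List.nodup_nil (by simp)
        (by simpa using List.isChain_singleton (R := pvLink d) start)
    obtain ⟨h1, h2, h3⟩ := pvCacheUpdate_inv d cache hinv
      (pyFindPath d cache [] start).1 (pyFindPath d cache [] start).2 hnd hmem hch hstop
    have hred : pyCacheStep d cache start = (if (pyFindPath d cache [] start).2 ∈ (pyFindPath d cache [] start).1 then
        ((pyFindPath d cache [] start).1.drop ((pyFindPath d cache [] start).1.idxOf (pyFindPath d cache [] start).2)).foldl (fun c x => c.insert x x)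
          (((pyFindPath d cache [] start).1.take ((pyFindPath d cache [] start).1.idxOf (pyFindPath d cache [] start).2)).foldl
            (fun c x => c.insert x (pyFindPath d cache [] start).2) cache)
      else (pyFindPath d cache [] start).1.foldl
        (fun c x => c.insert x (cache.getD (pyFindPath d cache [] start).2 (pyFindPath d cache [] start).2)) cache) := by
      simp only [pyCacheStep, hs']
      rfl
    rw [hred]
    refine ⟨h1, h2, fun hds => h3 start (hstartin hds hs' (List.not_mem_nil))⟩

theorem pvBuildCache (d : PySem.Dict String String) :
    ∀ (ks : List String) (c : PySem.Dict String String), pvInv d c →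
    pvInv d (ks.foldl (pyCacheStep d) c) ∧
    (∀ k, ((k ∈ ks ∧ d.contains k = true) ∨ c.contains k = true) →
      (ks.foldl (pyCacheStep d) c).contains k = true) := by
  intro ks
  induction ks with
  | nil =>
    intro c hinv
    refine ⟨hinv, fun k hk => ?_⟩
    rcases hk with ⟨hk, _⟩ | hk
    · cases hk
    · exact hk
  | cons a t ih =>
    intro c hinv
    obtain ⟨h1, h2, h3⟩ := pvCacheStep_inv d c a hinv
    obtain ⟨ih1, ih2⟩ := ih _ h1
    refine ⟨ih1, ?_⟩
    intro k hk
    rcases hk with ⟨hkmem, hkd⟩ | hkc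
    · rcases List.mem_cons.1 hkmem with rfl | hkt
      · exact ih2 k (Or.inr (h3 hkd))
      · exact ih2 k (Or.inl ⟨hkt, hkd⟩)
    · exact ih2 k (Or.inr (h2 k hkc))

theorem pvCache_getD (d : PySem.Dict String String) (v : String) :
    (d.keys.foldl (pyCacheStep d) PySem.Dict.empty).getD v v = pyResolveChain d [] v := by
  have hinv0 : pvInv d PySem.Dict.empty := by
    constructor
    · intro x b hb; simp [PySem.Dict.get?_empty] at hb
    · intro y hy; simp [PySem.Dict.contains_empty] at hy
  obtain ⟨⟨ia, _⟩, cov⟩ := pvBuildCache d d.keys PySem.Dict.empty hinv0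
  by_cases h : (d.keys.foldl (pyCacheStep d) PySem.Dict.empty).contains v = true
  · have hsome : ∃ b, (d.keys.foldl (pyCacheStep d) PySem.Dict.empty).get? v = some b := by
      have := PySem.Dict.contains_eq_isSome_get? (d.keys.foldl (pyCacheStep d) PySem.Dict.empty) v
      rw [h] at this
      exact Option.isSome_iff_exists.1 this.symm
    obtain ⟨b, hb⟩ := hsome
    rw [PySem.Dict.getD_of_get?_eq_some _ _ hb]
    exact (ia v b hb).symm
  · have hcf : (d.keys.foldl (pyCacheStep d) PySem.Dict.empty).contains v = false := by simpa using h
    rw [PySem.Dict.getD_of_not_contains _ _ hcf]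
    by_cases hd : d.contains v = true
    · exact absurd (cov v (Or.inl ⟨(PySem.Dict.contains_iff_mem_keys _ _).1 hd, hd⟩)) (by simp [hcf])
    · exact (pvResolve_stop d (by simp [hd])).symm

-- ===== VERDICT (by name: the statement is the Claim_ definition above) =====
theorem invert_to_base_list_py_spec : Claim_equal_invert_to_base_list_py := by
  intro fwd _
  unfold Spec_invert_to_base_list_py
  simp only [invert_to_base_list_py, invert_to_base_list_py_alt]
  have hfresh : ∀ a ∈ (PySem.Dict.ofList fwd).items,
      (PySem.Dict.empty : PySem.Dict String String).contains a.1 = false := by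
    intro a _
    simp [PySem.Dict.contains_empty]
  have hnodup : ((PySem.Dict.ofList fwd).items.map (fun kv => kv.1)).Nodup :=
    PySem.Dict.nodup_keys_ofList fwd
  have hcoll := PySem.Dict.items_foldl_insert_fresh (PySem.Dict.ofList fwd).items
      (fun kv => kv.1) (fun kv => pyResolveChain (PySem.Dict.ofList fwd) [] kv.2)
      PySem.Dict.empty hfresh hnodup
  beta_reduce at hcoll
  rw [show (PySem.Dict.empty : PySem.Dict String String).items = ([] : List (String × String)) from rfl,
    List.nil_append] at hcoll
  rw [hcoll, List.foldl_map]
  simp only [pvCache_getD]
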